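-- pv_equiv track=rewrite | github.com/argenismahath/evebot | EnemyProsessiing.py | reemplazar_similares
-- ===== SOURCE A (Python) =====
-- def reemplazar_similares(texto):
--     replacements = {
--         'o': '0',
--         'O': '0',
--         's': '5',
--         'S': '5',
--         'l': '1',
--         'L': '1',
--         'i': '1',
--         'z':'2'
--         # Agrega más reemplazos según sea necesario
--     }
--
--     for char, replacement in replacements.items():
--         texto = texto.replace(char, replacement)
--
--     return texto
-- ===== SOURCE B (Python) =====
-- def reemplazar_similares(texto):
--     replacements = {
--         'o': '0',
--         'O': '0',
--         's': '5',
--         'S': '5',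
--         'l': '1',
--         'L': '1',
--         'i': '1',
--         'z': '2'
--     }
--     return ''.join(replacements.get(c, c) for c in texto)
-- ===== Notes on version B (the rewrite author's own statement) =====
-- stated objective: idiomatic
-- what changed: B makes a single left-to-right pass over the string's characters, mapping each through the replacement dict with a default of itself, instead of A's 8 repeated full-string .replace() scans; equivalence holds because no replacement value is itself a key.
import Mathlib
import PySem

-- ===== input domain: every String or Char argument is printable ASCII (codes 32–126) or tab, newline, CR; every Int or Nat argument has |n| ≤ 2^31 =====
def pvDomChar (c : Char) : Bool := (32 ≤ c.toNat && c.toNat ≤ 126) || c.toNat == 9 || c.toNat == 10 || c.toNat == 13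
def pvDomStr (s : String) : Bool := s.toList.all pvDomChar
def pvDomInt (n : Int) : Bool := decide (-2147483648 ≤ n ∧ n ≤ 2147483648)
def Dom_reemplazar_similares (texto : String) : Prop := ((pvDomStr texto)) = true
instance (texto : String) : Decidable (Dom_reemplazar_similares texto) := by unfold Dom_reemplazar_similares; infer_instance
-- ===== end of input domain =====

-- B replaces A's 8 repeated full-string .replace() scans by ONE pass over the
-- string's characters, each mapped through the replacement dict (objective: idiomatic).

-- ===== PORT A =====
def reemplazar_similares (texto : String) : String :=
  let replacements : PySem.Dict String String :=
    PySem.Dict.ofList [("o", "0"), ("O", "0"), ("s", "5"), ("S", "5"),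
                       ("l", "1"), ("L", "1"), ("i", "1"), ("z", "2")]
  replacements.items.foldl (fun t p => PySem.Str.replace t p.1 p.2) texto

-- ===== PORT B =====
def reemplazar_similares_alt (texto : String) : String :=
  let replacements : PySem.Dict Char Char :=
    PySem.Dict.ofList [('o', '0'), ('O', '0'), ('s', '5'), ('S', '5'),
                       ('l', '1'), ('L', '1'), ('i', '1'), ('z', '2')]
  String.ofList (texto.toList.map (fun c => replacements.getD c c))

-- ===== PRECONDITION & SPEC =====
def Spec_reemplazar_similares (texto : String) (out : String) : Prop := out = reemplazar_similares_alt texto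
instance (texto : String) (out : String) : Decidable (Spec_reemplazar_similares texto out) := by unfold Spec_reemplazar_similares; infer_instance

-- ===== CLAIM (what is proved, stated in full; the proofs are below) =====
def Claim_equal_reemplazar_similares : Prop := ∀ (texto : String), Dom_reemplazar_similares texto → Spec_reemplazar_similares texto (reemplazar_similares texto)

-- ===== LEMMAS AND PROOFS =====

-- proof-only helper: one single-character replacement as a function on characters
def repl (k v : Char) (c : Char) : Char := if c = k then v else c

-- replace.go with a single-character pattern maps that character, given enough fuel
lemma go_single (k v : Char) : ∀ (fuel : Nat) (l acc : List Char), l.length ≤ fuel →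
    PySem.Chars.replace.go [k] [v] fuel l acc = acc.reverse ++ l.map (repl k v) := by
  intro fuel
  induction fuel with
  | zero =>
      intro l acc h
      have : l = [] := by simpa using List.length_eq_zero_iff.mp (Nat.le_zero.mp h)
      subst this; simp [PySem.Chars.replace.go]
  | succ n ih =>
      intro l acc h
      cases l with
      | nil => simp [PySem.Chars.replace.go]
      | cons c t =>
          rw [PySem.Chars.replace.go]
          by_cases hk : k = c
          · subst hk
            simp only [List.isPrefixOf]
            simp [ih t (v :: acc) (by simpa using Nat.le_of_succ_le_succ h), repl]
          · have hpre : [k].isPrefixOf (c :: t) = false := by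
              simp [List.isPrefixOf]; exact fun hh => absurd hh hk
            have hck : ¬ c = k := fun hh => hk hh.symm
            simp [hpre, ih t (c :: acc) (by simpa using Nat.le_of_succ_le_succ h), repl, hck]

-- Python s.replace(old, new) with single-character old and new is a character map
lemma replace_single (k v : Char) (s : List Char) :
    PySem.Chars.replace s [k] [v] = s.map (repl k v) := by
  rw [PySem.Chars.replace]
  simp [go_single k v s.length s [] (le_refl _)]

-- B's literal Char dict lists its pairs in insertion order
lemma items_char_dict :
    (PySem.Dict.ofList [('o', '0'), ('O', '0'), ('s', '5'), ('S', '5'),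
                        ('l', '1'), ('L', '1'), ('i', '1'), ('z', '2')]).items
      = [('o', '0'), ('O', '0'), ('s', '5'), ('S', '5'),
         ('l', '1'), ('L', '1'), ('i', '1'), ('z', '2')] := by decide

-- A's literal String dict lists its pairs in insertion order
lemma items_str_dict :
    (PySem.Dict.ofList [("o", "0"), ("O", "0"), ("s", "5"), ("S", "5"),
                        ("l", "1"), ("L", "1"), ("i", "1"), ("z", "2")]).items
      = [("o", "0"), ("O", "0"), ("s", "5"), ("S", "5"),
         ("l", "1"), ("L", "1"), ("i", "1"), ("z", "2")] := by decide

-- the 8 composed single-character replacements agree with B's dict lookup, charwise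
lemma chain_eq_getD (c : Char) :
    repl 'z' '2' (repl 'i' '1' (repl 'L' '1' (repl 'l' '1' (repl 'S' '5'
      (repl 's' '5' (repl 'O' '0' (repl 'o' '0' c))))))) =
    (PySem.Dict.ofList [('o', '0'), ('O', '0'), ('s', '5'), ('S', '5'),
                        ('l', '1'), ('L', '1'), ('i', '1'), ('z', '2')]).getD c c := by
  simp only [PySem.Dict.getD, PySem.Dict.get?, items_char_dict]
  by_cases h1 : c = 'o' <;> by_cases h2 : c = 'O' <;> by_cases h3 : c = 's' <;>
    by_cases h4 : c = 'S' <;> by_cases h5 : c = 'l' <;> by_cases h6 : c = 'L' <;>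
    by_cases h7 : c = 'i' <;> by_cases h8 : c = 'z' <;>
    first
      | (have g1 : ('o' == c) = false := by simpa using Ne.symm h1
         have g2 : ('O' == c) = false := by simpa using Ne.symm h2
         have g3 : ('s' == c) = false := by simpa using Ne.symm h3
         have g4 : ('S' == c) = false := by simpa using Ne.symm h4
         have g5 : ('l' == c) = false := by simpa using Ne.symm h5
         have g6 : ('L' == c) = false := by simpa using Ne.symm h6
         have g7 : ('i' == c) = false := by simpa using Ne.symm h7
         have g8 : ('z' == c) = false := by simpa using Ne.symm h8
         simp [repl, g1, g2, g3, g4, g5, g6, g7, g8, h1, h2, h3, h4, h5, h6, h7, h8])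
      | simp_all [repl, List.find?]

-- the 8 successive character maps of A collapse to B's single dict-lookup map
lemma maps_chain (l : List Char) :
    ((((((((l.map (repl 'o' '0')).map (repl 'O' '0')).map (repl 's' '5')).map (repl 'S' '5')).map
        (repl 'l' '1')).map (repl 'L' '1')).map (repl 'i' '1')).map (repl 'z' '2'))
      = l.map (fun c =>
          (PySem.Dict.ofList [('o', '0'), ('O', '0'), ('s', '5'), ('S', '5'),
                              ('l', '1'), ('L', '1'), ('i', '1'), ('z', '2')]).getD c c) := by
  induction l with
  | nil => rfl
  | cons c t ih => simp only [List.map_cons, ih, chain_eq_getD c]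

-- ===== VERDICT (by name: the statement is the Claim_ definition above) =====
theorem reemplazar_similares_spec : Claim_equal_reemplazar_similares := by
  intro texto _
  show reemplazar_similares texto = reemplazar_similares_alt texto
  have hA : (reemplazar_similares texto).toList
      = texto.toList.map (fun c =>
          (PySem.Dict.ofList [('o', '0'), ('O', '0'), ('s', '5'), ('S', '5'),
                              ('l', '1'), ('L', '1'), ('i', '1'), ('z', '2')]).getD c c) := by
    change (List.foldl (fun t p => PySem.Str.replace t p.1 p.2) texto
        (PySem.Dict.ofList [("o", "0"), ("O", "0"), ("s", "5"), ("S", "5"),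
                            ("l", "1"), ("L", "1"), ("i", "1"), ("z", "2")]).items).toList = _
    rw [items_str_dict]
    simp only [List.foldl, PySem.Str.toList_replace]
    simp only [show ("o" : String).toList = ['o'] from rfl, show ("0" : String).toList = ['0'] from rfl,
               show ("O" : String).toList = ['O'] from rfl, show ("s" : String).toList = ['s'] from rfl,
               show ("5" : String).toList = ['5'] from rfl, show ("S" : String).toList = ['S'] from rfl,
               show ("l" : String).toList = ['l'] from rfl, show ("1" : String).toList = ['1'] from rfl,
               show ("L" : String).toList = ['L'] from rfl, show ("i" : String).toList = ['i'] from rfl,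
               show ("z" : String).toList = ['z'] from rfl, show ("2" : String).toList = ['2'] from rfl]
    simp only [replace_single]
    exact maps_chain texto.toList
  calc reemplazar_similares texto
      = String.ofList (reemplazar_similares texto).toList := (String.ofList_toList).symm
    _ = reemplazar_similares_alt texto := by rw [hA]; rfl
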